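-- pv_equiv track=rewrite | github.com/Liebranca/bitter | src/AVTOMAT/avto-fmat.py | mkline
-- ===== SOURCE A (Python) =====
-- def mkline(s,indent,pad):
--   result="";i=0;subs=s.split('\n');
--   for sub in subs:
--
--     nl='\n' if i<(len(subs)-1) else '';
--
--     if(i):
--       result=result+indent+pad+sub+nl;
--
--     else:
--       result=result+indent+sub+nl;
--
--     i+=1;
--
--   return result;
-- ===== SOURCE B (Python) =====
-- def mkline(s, indent, pad):
--     # single character-level scan: no split into lines, no index counter;
--     # emit indent once, then copy chars, inserting indent+pad after each newline
--     out = indent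
--     for ch in s:
--         out += ch
--         if ch == '\n':
--             out += indent + pad
--     return out
-- ===== Notes on version B (the rewrite author's own statement) =====
-- stated objective: alternative
-- what changed: Replaces A's split-into-lines loop (index counter, first-vs-rest branch, conditional trailing newline) with a single character-level scan of s that inserts indent+pad right after every newline character; the string is never split into lines at all.
import Mathlib
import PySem

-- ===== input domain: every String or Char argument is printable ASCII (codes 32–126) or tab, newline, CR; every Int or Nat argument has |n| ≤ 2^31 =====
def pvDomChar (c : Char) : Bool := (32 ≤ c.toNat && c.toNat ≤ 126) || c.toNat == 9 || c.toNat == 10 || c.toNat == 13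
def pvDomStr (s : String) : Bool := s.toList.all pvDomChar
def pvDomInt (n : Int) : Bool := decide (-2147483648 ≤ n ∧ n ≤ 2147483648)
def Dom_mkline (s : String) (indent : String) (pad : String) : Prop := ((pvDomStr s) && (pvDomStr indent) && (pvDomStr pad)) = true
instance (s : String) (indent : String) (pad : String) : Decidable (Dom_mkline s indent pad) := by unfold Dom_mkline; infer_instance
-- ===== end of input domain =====

-- ===== PORT A =====
-- B replaces A's split-into-lines loop (index counter, first-vs-rest branch, conditional
-- trailing newline) by a single character-level scan that inserts indent+pad after each '\n'
-- (objective: alternative decomposition; no speed claim).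
-- s.split('\n') is ported via PySem.Chars.splitOn (exact: the separator '\n' is nonempty).
def mklineStep (indent : String) (pad : String) (n : Int) (st : String × Int) (sub : String) : String × Int :=
  let nl : String := if st.2 < n - 1 then "\n" else ""
  (if st.2 ≠ 0 then st.1 ++ indent ++ pad ++ sub ++ nl
   else st.1 ++ indent ++ sub ++ nl, st.2 + 1)

def mkline (s : String) (indent : String) (pad : String) : String :=
  let subs : List String := (PySem.Chars.splitOn s.toList ['\n']).map String.ofList
  (subs.foldl (mklineStep indent pad (subs.length : Int)) ("", 0)).1

-- ===== PORT B =====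
-- the loop body of Source B: out += ch; if ch == '\n': out += indent + pad
def mklineCharStep (indent : String) (pad : String) (out : String) (ch : Char) : String :=
  (out.push ch) ++ (if ch = '\n' then indent ++ pad else "")

def mkline_alt (s : String) (indent : String) (pad : String) : String :=
  s.toList.foldl (mklineCharStep indent pad) indent

-- ===== PRECONDITION & SPEC =====
def Spec_mkline (s : String) (indent : String) (pad : String) (out : String) : Prop := out = mkline_alt s indent pad
instance (s : String) (indent : String) (pad : String) (out : String) : Decidable (Spec_mkline s indent pad out) := by unfold Spec_mkline; infer_instance

-- ===== CLAIM (what is proved, stated in full; the proofs are below) =====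
def Claim_equal_mkline : Prop := ∀ (s : String) (indent : String) (pad : String), Dom_mkline s indent pad → Spec_mkline s indent pad (mkline s indent pad)

-- ===== LEMMAS AND PROOFS =====

-- tailStr is A's loop-body contribution for the non-first lines.
def tailStr (indent pad : String) : List String → String
  | [] => ""
  | [y] => indent ++ pad ++ y
  | y :: ys => indent ++ pad ++ y ++ "\n" ++ tailStr indent pad ys

-- the pure structural form of s.split('\n')
def nlSplit : List Char → List (List Char)
  | [] => [[]]
  | c :: t =>
    match nlSplit t with
    | [] => [[]]
    | p :: ps => if c = '\n' then [] :: p :: ps else (c :: p) :: ps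

theorem nlSplit_ne_nil (l : List Char) : nlSplit l ≠ [] := by
  cases l with
  | nil => simp [nlSplit]
  | cons c t =>
    simp only [nlSplit]
    split
    · simp
    · split <;> simp

theorem splitOn_go_eq (l : List Char) (fuel : Nat) (cur : List Char) (acc : List (List Char))
    (h : l.length ≤ fuel) :
    PySem.Chars.splitOn.go ['\n'] fuel l cur acc
      = acc.reverse ++ (nlSplit l).modifyHead (cur.reverse ++ ·) := by
  induction l generalizing fuel cur acc with
  | nil => cases fuel <;> simp [PySem.Chars.splitOn.go, nlSplit]
  | cons c t ih =>
    cases fuel with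
    | zero => simp at h
    | succ f =>
      have hf : t.length ≤ f := by simpa using h
      rw [PySem.Chars.splitOn.go]
      by_cases hc : c = '\n'
      · have hpre : List.isPrefixOf ['\n'] (c :: t) = true := by
          simp [List.isPrefixOf, hc]
        rw [if_pos hpre]
        simp only [List.length_cons, List.length_nil, List.drop_succ_cons, List.drop_zero]
        rw [ih f [] (List.reverse cur :: acc) hf]
        obtain ⟨p, ps, hps⟩ : ∃ p ps, nlSplit t = p :: ps := by
          cases hh : nlSplit t with
          | nil => exact absurd hh (nlSplit_ne_nil t)
          | cons p ps => exact ⟨p, ps, rfl⟩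
        simp [nlSplit, hps, hc]
      · have hpre : List.isPrefixOf ['\n'] (c :: t) = false := by
          simp [List.isPrefixOf]
          intro h'; exact absurd h'.symm hc
        rw [if_neg (by simp [hpre])]
        rw [ih f (c :: cur) acc hf]
        obtain ⟨p, ps, hps⟩ : ∃ p ps, nlSplit t = p :: ps := by
          cases hh : nlSplit t with
          | nil => exact absurd hh (nlSplit_ne_nil t)
          | cons p ps => exact ⟨p, ps, rfl⟩
        simp [nlSplit, hps, hc]

theorem splitOn_eq_nlSplit (s : List Char) :
    PySem.Chars.splitOn s ['\n'] = nlSplit s := by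
  rw [PySem.Chars.splitOn, splitOn_go_eq s (s.length + 1) [] [] (by omega)]
  obtain ⟨p, ps, hps⟩ : ∃ p ps, nlSplit s = p :: ps := by
    cases hh : nlSplit s with
    | nil => exact absurd hh (nlSplit_ne_nil s)
    | cons p ps => exact ⟨p, ps, rfl⟩
  simp [hps]

theorem join_single (sep y : String) : PySem.Str.join sep [y] = y := by
  simp [PySem.Str.join, PySem.Chars.join, List.intercalate, List.intersperse_single,
    String.ofList_toList]

theorem join_cons (sep y z : String) (zs : List String) :
    PySem.Str.join sep (y :: z :: zs) = y ++ sep ++ PySem.Str.join sep (z :: zs) := by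
  simp [PySem.Str.join, PySem.Chars.join, List.intercalate, List.intersperse_cons₂,
    String.ofList_append, String.ofList_toList, String.append_assoc]

theorem loopA (indent pad : String) (xs : List String) (n : Int) (r : String) (i : Int)
    (h1 : 1 ≤ i) (h2 : i + xs.length = n) :
    xs.foldl (mklineStep indent pad n) (r, i) = (r ++ tailStr indent pad xs, n) := by
  induction xs generalizing r i with
  | nil => simp at h2; simp [tailStr, h2]
  | cons y ys ih =>
    cases ys with
    | nil =>
      simp at h2
      simp [mklineStep, tailStr, ← h2, String.append_assoc]
      omega
    | cons z zs =>
      have hcond : i < n - 1 := by simp at h2; omega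
      have hne : i ≠ 0 := by omega
      rw [List.foldl_cons]
      have hstep : mklineStep indent pad n (r, i) y = (r ++ indent ++ pad ++ y ++ "\n", i + 1) := by
        simp [mklineStep, hcond, hne]
      have hrec := ih (r ++ indent ++ pad ++ y ++ "\n") (i + 1) (by omega)
        (by simp at h2 ⊢; omega)
      rw [hstep, hrec]
      simp [tailStr, String.append_assoc]

theorem join_tail (indent pad : String) (y : String) (ys : List String) :
    "\n" ++ tailStr indent pad (y :: ys) =
      ("\n" ++ indent ++ pad) ++ PySem.Str.join ("\n" ++ indent ++ pad) (y :: ys) := by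
  induction ys generalizing y with
  | nil => simp [tailStr, join_single, String.append_assoc]
  | cons z zs ih =>
    have hts : tailStr indent pad (y :: z :: zs)
        = indent ++ pad ++ y ++ "\n" ++ tailStr indent pad (z :: zs) := rfl
    rw [join_cons, hts]
    have := ih z
    simp only [String.append_assoc] at this ⊢
    rw [this]

-- A's value as a join over the split parts
theorem mklineA_eq_join (s indent pad : String) :
    mkline s indent pad =
      indent ++ PySem.Str.join ("\n" ++ indent ++ pad)
        ((PySem.Chars.splitOn s.toList ['\n']).map String.ofList) := by
  unfold mkline
  dsimp only
  generalize h : (PySem.Chars.splitOn s.toList ['\n']).map String.ofList = parts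
  have hne : parts ≠ [] := by
    rw [← h, splitOn_eq_nlSplit]
    simp only [ne_eq, List.map_eq_nil_iff]
    exact nlSplit_ne_nil s.toList
  cases parts with
  | nil => exact absurd rfl hne
  | cons x xs =>
    cases xs with
    | nil => simp [mklineStep, join_single]
    | cons y ys =>
      rw [List.foldl_cons]
      have hstep : mklineStep indent pad ((x :: y :: ys).length : Int) ("", 0) x
          = (indent ++ x ++ "\n", 1) := by
        simp [mklineStep]
      have hrec := loopA indent pad (y :: ys) ((x :: y :: ys).length : Int)
        (indent ++ x ++ "\n") 1 le_rfl (by simp; omega)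
      rw [hstep, hrec, join_cons]
      have ht := join_tail indent pad y ys
      simp only [String.append_assoc] at ht ⊢
      rw [ht]

theorem push_eq_append (r : String) (c : Char) : r.push c = r ++ String.ofList [c] := by
  apply String.toList_injective
  simp

-- B's char scan computes the same join, by induction on the characters
theorem loopB (indent pad : String) (l : List Char) (r : String) :
    l.foldl (mklineCharStep indent pad) r
      = r ++ PySem.Str.join ("\n" ++ indent ++ pad) ((nlSplit l).map String.ofList) := by
  induction l generalizing r with
  | nil => simp [nlSplit, join_single]
  | cons c t ih =>
    rw [List.foldl_cons, ih]
    obtain ⟨p, ps, hps⟩ : ∃ p ps, nlSplit t = p :: ps := by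
      cases hh : nlSplit t with
      | nil => exact absurd hh (nlSplit_ne_nil t)
      | cons p ps => exact ⟨p, ps, rfl⟩
    by_cases hc : c = '\n'
    · have hsplit : nlSplit (c :: t) = [] :: p :: ps := by simp [nlSplit, hps, hc]
      have hstep : mklineCharStep indent pad r c = r ++ "\n" ++ indent ++ pad := by
        simp [mklineCharStep, hc, push_eq_append, String.append_assoc]
      rw [hsplit, hstep, hps]
      simp only [List.map_cons]
      rw [join_cons]
      simp [String.append_assoc]
    · have hsplit : nlSplit (c :: t) = (c :: p) :: ps := by simp [nlSplit, hps, hc]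
      have hstep : mklineCharStep indent pad r c = r ++ String.ofList [c] := by
        simp [mklineCharStep, hc, push_eq_append]
      rw [hsplit, hstep, hps]
      cases ps with
      | nil =>
        simp only [List.map_cons, List.map_nil]
        rw [join_single, join_single]
        apply String.toList_injective
        simp
      | cons q qs =>
        simp only [List.map_cons]
        rw [join_cons, join_cons]
        apply String.toList_injective
        simp

-- ===== VERDICT (by name: the statement is the Claim_ definition above) =====
theorem mkline_spec : Claim_equal_mkline := by
  intro s indent pad _
  show mkline s indent pad = mkline_alt s indent pad
  rw [mklineA_eq_join, mkline_alt, loopB, splitOn_eq_nlSplit]
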